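-- pv_equiv track=rewrite | github.com/emczg/corsort | lib/corsort/sort_ford_johnson.py | _give_the_right_order
-- ===== SOURCE A (Python) =====
-- def _give_the_right_order(n):  # In ford_johnson_sorting, always need to put len(collection)-1
--     """
--
--     Parameters
--     ----------
--     n: class: `int`
--              The size of the collection + 1. Must be >= 0 (i.e. the collection must have at least one element).
--     Returns
--     -------
--     :class: `list`
--             A list that gives the right order of insertion for the last step of ford johnson
--
--     Examples
--     --------
--         >>> _give_the_right_order(7)
--         [5, 6, 3, 4, 0, 1, 2]
--         >>> _give_the_right_order(0)
--         []
--     """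
--     my_list = []
--     k = 1  # number of the set
--     i = 0
--     position_k = 0  # insertion position when elt belongs to set k
--     while i < n:
--         cpt = 0
--         if k % 2 == 0:
--             while (cpt < (2**k + (-2-(-2)**k)//3)) and i < n:
--                 my_list.insert(position_k, n - 1 - i)
--                 i += 1
--                 cpt += 1
--             position_k += (2**k + (-2-(-2)**k)//3)
--         else:
--             while (cpt < (2**k - (-2-(-2)**k)//3)) and i < n:
--                 my_list.insert(position_k, n - 1 - i)
--                 i += 1
--                 cpt += 1
--             position_k += (2**k - (-2-(-2)**k)//3)
--         k += 1
--     return my_list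
-- ===== SOURCE B (Python) =====
-- def _give_the_right_order(n):
--     # One pass: each Ford-Johnson group is a contiguous ascending run appended left to
--     # right; the group size follows the Jacobsthal-style recurrence size_next = p - size
--     # where p doubles each step, so no power/floordiv formula and no list.insert shifting.
--     out = []
--     start, size, p = 0, 2, 4
--     while start < n:
--         end = min(start + size, n)
--         out.extend(range(n - end, n - start))
--         start, size, p = end, p - size, 2 * p
--     return out
-- ===== Notes on version B (the rewrite author's own statement) =====
-- stated objective: faster
-- what changed: Replaces repeated list.insert at a moving position (quadratic element shifting) by emitting each Jacobsthal-sized group as a contiguous ascending range appended left-to-right in one pass, maintaining the group size by a doubling recurrence instead of re-evaluating the power/floordiv formula.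
import Mathlib
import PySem

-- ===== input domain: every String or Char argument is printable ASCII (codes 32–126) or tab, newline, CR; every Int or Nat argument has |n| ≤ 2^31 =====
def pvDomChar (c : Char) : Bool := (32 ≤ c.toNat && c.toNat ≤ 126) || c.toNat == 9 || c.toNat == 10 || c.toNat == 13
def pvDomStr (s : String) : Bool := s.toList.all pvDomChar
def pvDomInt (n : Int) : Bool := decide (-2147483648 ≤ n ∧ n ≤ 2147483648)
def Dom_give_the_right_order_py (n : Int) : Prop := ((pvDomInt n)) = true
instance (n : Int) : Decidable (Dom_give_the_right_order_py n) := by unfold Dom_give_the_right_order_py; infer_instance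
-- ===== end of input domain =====

-- B replaces A's repeated list.insert at a moving position by appending each group as a
-- contiguous ascending range in one pass, maintaining the group size by a recurrence (faster).

-- ===== PORT A =====
-- the group-size expression A computes in both branches: 2**k ± (-2-(-2)**k)//3
def gtrSizeA (k : Int) : Int :=
  if PySem.Int.mod k 2 = 0 then
    2 ^ k.toNat + PySem.Int.floordiv (-2 - (-2) ^ k.toNat) 3
  else
    2 ^ k.toNat - PySem.Int.floordiv (-2 - (-2) ^ k.toNat) 3

-- inner while loop: while cpt < size and i < n: my_list.insert(position_k, n - 1 - i); i += 1; cpt += 1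
def gtrInnerA (n size pos : Int) (lst : List Int) (i cpt : Int) : List Int × Int :=
  if h : cpt < size ∧ i < n then
    gtrInnerA n size pos (PySem.List.insert lst pos (n - 1 - i)) (i + 1) (cpt + 1)
  else (lst, i)
termination_by (size - cpt).toNat
decreasing_by omega

-- outer while loop: while i < n (fuel = n.toNat + 1 outer iterations always suffice,
-- since every group has size ≥ 2 and thus i strictly increases each iteration)
def gtrOuterA (n : Int) (lst : List Int) (k i pos : Int) : Nat → List Int
  | 0 => lst
  | fuel + 1 =>
    if i < n then
      let r := gtrInnerA n (gtrSizeA k) pos lst i 0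
      gtrOuterA n r.1 (k + 1) r.2 (pos + gtrSizeA k) fuel
    else lst

def give_the_right_order_py (n : Int) : List Int := gtrOuterA n [] 1 0 0 (n.toNat + 1)

-- ===== PORT B =====
-- while start < n: end = min(start+size, n); out.extend(range(n-end, n-start)); advance
def gtrLoopB (n : Int) (out : List Int) (start size p : Int) : Nat → List Int
  | 0 => out
  | fuel + 1 =>
    if start < n then
      let e := min (start + size) n
      gtrLoopB n (out ++ PySem.List.pyRange (n - e) (n - start) 1) e (p - size) (2 * p) fuel
    else out

def give_the_right_order_py_alt (n : Int) : List Int := gtrLoopB n [] 0 2 4 (n.toNat + 1)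

-- ===== PRECONDITION & SPEC =====
def Spec_give_the_right_order_py (n : Int) (out : List Int) : Prop := out = give_the_right_order_py_alt n
instance (n : Int) (out : List Int) : Decidable (Spec_give_the_right_order_py n out) := by unfold Spec_give_the_right_order_py; infer_instance

-- ===== CLAIM (what is proved, stated in full; the proofs are below) =====
def Claim_equal_give_the_right_order_py : Prop := ∀ (n : Int), Dom_give_the_right_order_py n → Spec_give_the_right_order_py n (give_the_right_order_py n)

-- ===== LEMMAS AND PROOFS =====

lemma pv_three_dvd (m : Nat) : (3 : Int) ∣ (-2 - (-2) ^ m) := by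
  induction m with
  | zero => decide
  | succ m ih =>
    obtain ⟨t, ht⟩ := ih
    exact ⟨-2 - 2 * t, by rw [pow_succ]; linarith⟩

lemma gtrSizeA_closed (m : Nat) : 3 * gtrSizeA (m : Int) = 2 ^ (m + 1) - 2 * (-1 : Int) ^ m := by
  obtain ⟨t, ht⟩ := pv_three_dvd m
  have hfd : PySem.Int.floordiv (-2 - (-2) ^ m) 3 = t := by
    rw [PySem.Int.floordiv_eq_ediv_of_pos (by norm_num), ht]
    exact Int.mul_ediv_cancel_left t (by norm_num)
  unfold gtrSizeA
  rw [Int.toNat_natCast]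
  rcases Nat.even_or_odd m with he | ho
  · have hmod : PySem.Int.mod (m : Int) 2 = 0 := by
      rw [PySem.Int.mod_eq_emod_of_pos (by norm_num)]
      obtain ⟨j, hj⟩ := he
      subst hj; push_cast; omega
    rw [if_pos hmod, hfd]
    rw [he.neg_pow] at ht
    rw [he.neg_one_pow, pow_succ]
    linarith
  · have hmod : ¬ PySem.Int.mod (m : Int) 2 = 0 := by
      rw [PySem.Int.mod_eq_emod_of_pos (by norm_num)]
      obtain ⟨j, hj⟩ := ho
      subst hj; push_cast; omega
    rw [if_neg hmod, hfd]
    rw [ho.neg_pow] at ht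
    rw [ho.neg_one_pow, pow_succ]
    linarith

lemma gtrSizeA_sum (m : Nat) : gtrSizeA (m : Int) + gtrSizeA ((m + 1 : Nat) : Int) = 2 ^ (m + 1) := by
  have h1 := gtrSizeA_closed m
  have h2 := gtrSizeA_closed (m + 1)
  have h3 : ((-1 : Int)) ^ (m + 1) = -((-1 : Int) ^ m) := by rw [pow_succ]; ring
  have h4 : (2 : Int) ^ (m + 2) = 2 * 2 ^ (m + 1) := by rw [pow_succ]; ring
  nlinarith [h1, h2]

lemma gtrSizeA_two_le (m : Nat) (hm : 1 ≤ m) : 2 ≤ gtrSizeA (m : Int) := by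
  have h := gtrSizeA_closed m
  rcases Nat.even_or_odd m with he | ho
  · have hm2 : 2 ≤ m := by
      rcases he with ⟨j, hj⟩; omega
    have hpow : (8 : Int) ≤ 2 ^ (m + 1) := by
      calc (8 : Int) = 2 ^ 3 := by norm_num
      _ ≤ 2 ^ (m + 1) := by
        apply pow_le_pow_right₀ (by norm_num)
        omega
    rw [he.neg_one_pow] at h
    linarith
  · have hpow : (4 : Int) ≤ 2 ^ (m + 1) := by
      calc (4 : Int) = 2 ^ 2 := by norm_num
      _ ≤ 2 ^ (m + 1) := by
        apply pow_le_pow_right₀ (by norm_num)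
        omega
    rw [ho.neg_one_pow] at h
    linarith

lemma gtrInnerA_eq (s : Nat) (n size : Int) (pre : List Int) :
    ∀ (grp : List Int) (i cpt : Int), (size - cpt).toNat ≤ s →
    gtrInnerA n size (pre.length : Int) (pre ++ grp) i cpt
      = (pre ++ PySem.List.pyRange (n - (i + ((min (size - cpt) (n - i)).toNat : Int))) (n - i) 1 ++ grp,
         i + ((min (size - cpt) (n - i)).toNat : Int)) := by
  induction s with
  | zero =>
    intro grp i cpt hs
    have hns : ¬ (cpt < size ∧ i < n) := by omega
    rw [gtrInnerA, dif_neg hns]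
    have h0 : (min (size - cpt) (n - i)).toNat = 0 := by omega
    rw [h0]
    rw [PySem.List.pyRange_one_eq_nil (by push_cast; omega)]
    simp
  | succ s ih =>
    intro grp i cpt hs
    by_cases h : cpt < size ∧ i < n
    · rw [gtrInnerA, dif_pos h]
      have hins : PySem.List.insert (pre ++ grp) (pre.length : Int) (n - 1 - i)
          = pre ++ (n - 1 - i) :: grp := by
        rw [PySem.List.insert_natCast _ _ _ (by simp)]
        simp
      rw [hins, ih ((n - 1 - i) :: grp) (i + 1) (cpt + 1) (by omega)]
      have ha : n - (i + ((min (size - cpt) (n - i)).toNat : Int))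
          = n - ((i + 1) + ((min (size - (cpt + 1)) (n - (i + 1))).toNat : Int)) := by omega
      have hi : i + ((min (size - cpt) (n - i)).toNat : Int)
          = (i + 1) + ((min (size - (cpt + 1)) (n - (i + 1))).toNat : Int) := by omega
      rw [ha, hi]
      have hb : PySem.List.pyRange (n - ((i + 1) + ((min (size - (cpt + 1)) (n - (i + 1))).toNat : Int))) (n - i) 1
          = PySem.List.pyRange (n - ((i + 1) + ((min (size - (cpt + 1)) (n - (i + 1))).toNat : Int))) (n - (i + 1)) 1
            ++ [n - (i + 1)] := by
        have hnb : n - i = (n - (i + 1)) + 1 := by ring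
        rw [hnb, PySem.List.pyRange_one_succ_right (by omega)]
      rw [hb]
      have hv : n - 1 - i = n - (i + 1) := by ring
      simp [hv]
    · rw [gtrInnerA, dif_neg h]
      have h0 : (min (size - cpt) (n - i)).toNat = 0 := by omega
      rw [h0]
      rw [PySem.List.pyRange_one_eq_nil (by push_cast; omega)]
      simp

lemma gtrOuterA_stop (n : Int) (lst : List Int) (k i pos : Int) (f : Nat) (h : ¬ i < n) :
    gtrOuterA n lst k i pos f = lst := by
  cases f <;> simp [gtrOuterA, h]

lemma gtrLoopB_stop (n : Int) (out : List Int) (start size p : Int) (f : Nat) (h : ¬ start < n) :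
    gtrLoopB n out start size p f = out := by
  cases f <;> simp [gtrLoopB, h]

lemma pv_outer_eq (fuel : Nat) : ∀ (n : Int) (m : Nat) (out : List Int), 1 ≤ m →
    gtrOuterA n out (m : Int) (out.length : Int) (out.length : Int) fuel
      = gtrLoopB n out (out.length : Int) (gtrSizeA (m : Int)) (2 ^ (m + 1)) fuel := by
  induction fuel with
  | zero => intro n m out hm; rfl
  | succ fuel ih =>
    intro n m out hm
    by_cases hin : (out.length : Int) < n
    · simp only [gtrOuterA, gtrLoopB, if_pos hin]
      have hsz2 : 2 ≤ gtrSizeA (m : Int) := gtrSizeA_two_le m hm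
      have hinner := gtrInnerA_eq (gtrSizeA (m : Int) - 0).toNat n (gtrSizeA (m : Int)) out []
        ((out.length : Int)) 0 (le_refl _)
      simp only [List.append_nil] at hinner
      rw [hinner]
      set L := (out.length : Int) with hL
      set size := gtrSizeA (m : Int) with hsz
      have hc : L + (((min (size - 0) (n - L)).toNat : Nat) : Int) = min (L + size) n := by omega
      rw [hc]
      by_cases hfull : L + size ≤ n
      · have hmin : min (L + size) n = L + size := min_eq_left hfull
        rw [hmin]
        have hlen : (((out ++ PySem.List.pyRange (n - (L + size)) (n - L) 1).length : Nat) : Int)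
            = L + size := by
          rw [List.length_append, PySem.List.length_pyRange_one]
          push_cast
          omega
        have hrec := ih n (m + 1) (out ++ PySem.List.pyRange (n - (L + size)) (n - L) 1) (by omega)
        rw [hlen] at hrec
        push_cast at hrec
        rw [hrec]
        have hs2 : gtrSizeA ((m : Int) + 1) = 2 ^ (m + 1) - size := by
          have h := gtrSizeA_sum m
          push_cast at h
          linarith
        have hp2 : (2 : Int) ^ (m + 1 + 1) = 2 * 2 ^ (m + 1) := by
          rw [pow_succ]; ring
        rw [hs2, hp2]
      · have hmin : min (L + size) n = n := min_eq_right (by omega)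
        rw [hmin]
        rw [gtrOuterA_stop _ _ _ _ _ fuel (lt_irrefl n), gtrLoopB_stop _ _ _ _ _ fuel (lt_irrefl n)]
    · rw [gtrOuterA, if_neg hin, gtrLoopB, if_neg hin]

-- ===== VERDICT (by name: the statement is the Claim_ definition above) =====
theorem give_the_right_order_py_spec : Claim_equal_give_the_right_order_py := by
  intro n _
  unfold Spec_give_the_right_order_py give_the_right_order_py give_the_right_order_py_alt
  have h := pv_outer_eq (n.toNat + 1) n 1 [] (le_refl 1)
  simpa using h
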